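-- pv_equiv track=rewrite | github.com/fatima-elfat/programmingChallenges | challenge011.py | findDiffChar
-- ===== SOURCE A (Python) =====
-- def findDiffChar(input01: str, input02: str) -> str:
--     res = ""
--     input01 = sorted(input01)
--     input02 = sorted(input02)
--     for i in input01:
--         if input02:
--             for j in range(len(input02)):
--                 if i == input02[j]:
--                     del input02[j]
--                     break
--     if input02 != []:
--         for i in input02:
--             res += i
--     return res
-- ===== SOURCE B (Python) =====
-- def findDiffChar(input01: str, input02: str) -> str:
--     s1 = sorted(input01)
--     s2 = sorted(input02)
--     i = j = 0
--     out = []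
--     while i < len(s1) and j < len(s2):
--         if s1[i] < s2[j]:
--             i += 1
--         elif s2[j] < s1[i]:
--             out.append(s2[j])
--             j += 1
--         else:
--             i += 1
--             j += 1
--     out.extend(s2[j:])
--     return "".join(out)
-- ===== Notes on version B (the rewrite author's own statement) =====
-- stated objective: faster
-- what changed: Replaced A's per-character inner scan with repeated list deletion (quadratic after sorting) by a single two-pointer merge pass over the two sorted strings.
import Mathlib
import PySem

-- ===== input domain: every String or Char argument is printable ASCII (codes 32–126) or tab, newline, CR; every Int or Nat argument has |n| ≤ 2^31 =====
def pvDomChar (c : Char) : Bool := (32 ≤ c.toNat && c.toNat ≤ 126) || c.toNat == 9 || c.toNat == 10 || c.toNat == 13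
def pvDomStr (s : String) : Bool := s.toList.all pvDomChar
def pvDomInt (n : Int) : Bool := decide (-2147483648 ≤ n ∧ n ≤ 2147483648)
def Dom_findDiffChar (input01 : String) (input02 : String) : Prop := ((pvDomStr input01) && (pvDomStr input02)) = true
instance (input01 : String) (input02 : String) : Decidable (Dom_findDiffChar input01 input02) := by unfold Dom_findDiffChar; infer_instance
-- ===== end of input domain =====

-- B replaces A's nested delete-scan over the sorted lists by a single two-pointer merge pass (faster).

-- ===== PORT A =====
-- inner loop 'for j in range(len(input02)): if i == input02[j]: del input02[j]; break'
def pyDelFirst (c : Char) : List Char → List Char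
  | [] => []
  | x :: xs => if x = c then xs else x :: pyDelFirst c xs

def findDiffChar (input01 : String) (input02 : String) : String :=
  let s1 := PySem.List.sorted input01.toList (fun c => c) false
  let s2 := PySem.List.sorted input02.toList (fun c => c) false
  let rem := s1.foldl (fun acc i => if acc.isEmpty then acc else pyDelFirst i acc) s2
  if rem = [] then "" else String.ofList (rem.foldl (fun r i => r ++ [i]) [])

-- ===== PORT B =====
-- recursive form of Source B's two-index while loop; the '_, []' case is the loop ending
-- with s2 exhausted (nothing to extend), the '[], ys' case is 'out.extend(s2[j:])'
def mergeDiff : List Char → List Char → List Char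
  | _, [] => []
  | [], ys => ys
  | x :: xs, y :: ys =>
    if x < y then mergeDiff xs (y :: ys)
    else if y < x then y :: mergeDiff (x :: xs) ys
    else mergeDiff xs ys

def findDiffChar_alt (input01 : String) (input02 : String) : String :=
  String.ofList (mergeDiff (PySem.List.sorted input01.toList (fun c => c) false)
                       (PySem.List.sorted input02.toList (fun c => c) false))

-- ===== PRECONDITION & SPEC =====
def Spec_findDiffChar (input01 : String) (input02 : String) (out : String) : Prop := out = findDiffChar_alt input01 input02
instance (input01 : String) (input02 : String) (out : String) : Decidable (Spec_findDiffChar input01 input02 out) := by unfold Spec_findDiffChar; infer_instance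

-- ===== CLAIM (what is proved, stated in full; the proofs are below) =====
def Claim_equal_findDiffChar : Prop := ∀ (input01 : String) (input02 : String), Dom_findDiffChar input01 input02 → Spec_findDiffChar input01 input02 (findDiffChar input01 input02)

-- ===== LEMMAS AND PROOFS =====

theorem pyDelFirst_eq_erase (c : Char) (l : List Char) : pyDelFirst c l = l.erase c := by
  induction l with
  | nil => rfl
  | cons x xs ih =>
    by_cases h : x = c
    · simp [pyDelFirst, h]
    · simp [pyDelFirst, h, ih]

theorem foldl_del_eq_diff (s1 s2 : List Char) :
    s1.foldl (fun acc i => if acc.isEmpty then acc else pyDelFirst i acc) s2 = s2.diff s1 := by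
  induction s1 generalizing s2 with
  | nil => simp
  | cons x xs ih =>
    have hstep : (if s2.isEmpty then s2 else pyDelFirst x s2) = s2.erase x := by
      cases s2 with
      | nil => rfl
      | cons y ys => simp [pyDelFirst_eq_erase]
    simp only [List.foldl_cons, hstep, ih, List.diff_cons]

theorem foldl_append_singleton (l acc : List Char) :
    l.foldl (fun r i => r ++ [i]) acc = acc ++ l := by
  induction l generalizing acc with
  | nil => simp
  | cons x xs ih => simp [List.foldl_cons, ih]

theorem mergeDiff_cons_lt (xs l : List Char) (y : Char) (h : ∀ a ∈ xs, y < a) :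
    mergeDiff xs (y :: l) = y :: mergeDiff xs l := by
  cases xs with
  | nil => cases l <;> simp [mergeDiff]
  | cons x xs' =>
    have hy : y < x := h x (by simp)
    cases l with
    | nil => simp [mergeDiff, not_lt_of_gt hy, hy]
    | cons z zs => simp [mergeDiff, not_lt_of_gt hy, hy]

theorem mergeDiff_erase (x : Char) (xs s2 : List Char) (h1 : ∀ a ∈ xs, x ≤ a)
    (h2 : s2.Pairwise (· ≤ ·)) :
    mergeDiff (x :: xs) s2 = mergeDiff xs (s2.erase x) := by
  induction s2 with
  | nil => cases xs <;> simp [mergeDiff]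
  | cons y ys ih =>
    rcases lt_trichotomy x y with hlt | heq | hgt
    · -- x < y : x does not occur in y :: ys
      have hnm : x ∉ y :: ys := by
        intro hm
        rcases List.mem_cons.mp hm with h | h
        · exact absurd h (ne_of_lt hlt)
        · exact absurd (lt_of_lt_of_le hlt ((List.pairwise_cons.mp h2).1 _ h)) (lt_irrefl x)
      rw [List.erase_of_not_mem hnm]
      simp [mergeDiff, hlt]
    · subst heq
      simp [mergeDiff, List.erase_cons_head]
    · -- y < x
      have herase : (y :: ys).erase x = y :: ys.erase x := by
        rw [List.erase_cons_tail]
        simp [(ne_of_lt hgt)]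
      rw [herase]
      have hys : ys.Pairwise (· ≤ ·) := (List.pairwise_cons.mp h2).2
      have hxs : ∀ a ∈ xs, y < a := fun a ha => lt_of_lt_of_le hgt (h1 a ha)
      simp only [mergeDiff, not_lt_of_gt hgt, hgt, if_true, if_false]
      rw [ih hys, mergeDiff_cons_lt _ _ _ hxs]

theorem mergeDiff_eq_diff (s1 : List Char) : ∀ s2 : List Char, s1.Pairwise (· ≤ ·) →
    s2.Pairwise (· ≤ ·) → mergeDiff s1 s2 = s2.diff s1 := by
  induction s1 with
  | nil => intro s2 _ _; cases s2 <;> simp [mergeDiff]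
  | cons x xs ih =>
    intro s2 h1 h2
    rw [mergeDiff_erase x xs s2 (fun a ha => List.rel_of_pairwise_cons h1 ha) h2,
        ih (s2.erase x) (List.pairwise_cons.mp h1).2 (h2.sublist List.erase_sublist),
        List.diff_cons]

-- ===== VERDICT (by name: the statement is the Claim_ definition above) =====
theorem findDiffChar_spec : Claim_equal_findDiffChar := by
  intro input01 input02 _
  have p1 := PySem.List.sorted_pairwise input01.toList (fun c => c)
  have p2 := PySem.List.sorted_pairwise input02.toList (fun c => c)
  unfold Spec_findDiffChar findDiffChar findDiffChar_alt
  simp only [foldl_del_eq_diff, foldl_append_singleton,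
    mergeDiff_eq_diff _ _ p1 p2, List.nil_append]
  by_cases h : (PySem.List.sorted input02.toList (fun c => c) false).diff
      (PySem.List.sorted input01.toList (fun c => c) false) = [] <;> simp [h]
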